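-- pv_equiv track=rewrite | github.com/trevormax-smith/advent_of_code | 2020/day17.py | get_neighbor_coords
-- ===== SOURCE A (Python) =====
-- from itertools import product
--
-- def get_relative_neighbor_coords(n_dim=3):
--     relative_coords = list(product([-1, 0, 1], repeat=n_dim))
--     relative_coords.remove(tuple([0] * n_dim))
--     return relative_coords
--
-- def get_neighbor_coords(coords):
--     neighbor_coords = []
--     relative_neighbor_coords = get_relative_neighbor_coords(len(coords))
--     for rnc in relative_neighbor_coords:
--         this_neighbor_coord = []
--         for c, rn in zip(coords, rnc):
--             this_neighbor_coord.append(c + rn)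
--         neighbor_coords.append(tuple(this_neighbor_coord))
--     return neighbor_coords
-- ===== SOURCE B (Python) =====
-- from itertools import product
--
-- def get_neighbor_coords(coords):
--     result = list(product(*[(c - 1, c, c + 1) for c in coords]))
--     result.remove(tuple(coords))
--     return result
-- ===== Notes on version B (the rewrite author's own statement) =====
-- stated objective: simpler
-- what changed: B takes the cartesian product of the absolute per-dimension ranges (c-1,c,c+1) and removes the center tuple, eliminating A's separate relative-offset list and the inner elementwise-addition loop.
import Mathlib
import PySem

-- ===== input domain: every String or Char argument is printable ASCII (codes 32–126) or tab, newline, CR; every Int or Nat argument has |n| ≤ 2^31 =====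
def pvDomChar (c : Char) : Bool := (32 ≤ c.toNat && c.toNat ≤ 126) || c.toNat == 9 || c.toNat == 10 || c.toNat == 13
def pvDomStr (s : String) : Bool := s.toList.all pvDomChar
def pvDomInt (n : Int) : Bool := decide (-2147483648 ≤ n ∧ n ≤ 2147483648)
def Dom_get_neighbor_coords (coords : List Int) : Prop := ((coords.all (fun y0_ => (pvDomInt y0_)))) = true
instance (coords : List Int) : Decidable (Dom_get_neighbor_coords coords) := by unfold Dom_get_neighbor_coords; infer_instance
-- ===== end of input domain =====

-- B differs from A by taking the product of absolute per-dimension ranges (c-1,c,c+1)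
-- and removing the center tuple, instead of building relative offsets and adding them (objective: simpler).

-- ===== PORT A =====
-- itertools.product([-1,0,1], repeat=n): first coordinate varies slowest
def pvProdRep (n : Nat) : List (List Int) :=
  match n with
  | 0 => [[]]
  | Nat.succ m => ([-1, 0, 1] : List Int).flatMap (fun x => (pvProdRep m).map (fun rest => x :: rest))

-- list.remove raises ValueError if absent; the zero tuple is always present, so getD [] is never hit
def get_relative_neighbor_coords (n_dim : Nat) : List (List Int) :=
  (PySem.List.remove? (pvProdRep n_dim) (List.replicate n_dim 0)).getD []

-- the inner for-loop over zip(coords, rnc), appending c + rn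
def pvZipAdd (coords rnc : List Int) : List Int :=
  (List.zip coords rnc).foldl (fun acc p => acc ++ [p.1 + p.2]) []

def get_neighbor_coords (coords : List Int) : List (List Int) :=
  (get_relative_neighbor_coords coords.length).foldl
    (fun acc rnc => acc ++ [pvZipAdd coords rnc]) []

-- ===== PORT B =====
-- product(*[(c-1, c, c+1) for c in coords])
def pvProdAbs (coords : List Int) : List (List Int) :=
  match coords with
  | [] => [[]]
  | c :: cs => ([c - 1, c, c + 1] : List Int).flatMap (fun x => (pvProdAbs cs).map (fun rest => x :: rest))

-- result.remove(tuple(coords)); the center tuple is always present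
def get_neighbor_coords_alt (coords : List Int) : List (List Int) :=
  (PySem.List.remove? (pvProdAbs coords) coords).getD []

-- ===== PRECONDITION & SPEC =====
def Spec_get_neighbor_coords (coords : List Int) (out : List (List Int)) : Prop := out = get_neighbor_coords_alt coords
instance (coords : List Int) (out : List (List Int)) : Decidable (Spec_get_neighbor_coords coords out) := by unfold Spec_get_neighbor_coords; infer_instance

-- ===== CLAIM (what is proved, stated in full; the proofs are below) =====
def Claim_equal_get_neighbor_coords : Prop := ∀ (coords : List Int), Dom_get_neighbor_coords coords → Spec_get_neighbor_coords coords (get_neighbor_coords coords)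

-- ===== LEMMAS AND PROOFS =====

theorem pv_foldl_append {α β : Type} (g : α → β) (l : List α) (a : List β) :
    l.foldl (fun acc p => acc ++ [g p]) a = a ++ l.map g := by
  induction l generalizing a with
  | nil => simp
  | cons x xs ih => simp [List.foldl_cons, ih]

theorem pvZipAdd_eq (coords rnc : List Int) :
    pvZipAdd coords rnc = (List.zip coords rnc).map (fun p => p.1 + p.2) := by
  rw [pvZipAdd, pv_foldl_append]; rfl

theorem pvZipAdd_cons (c x : Int) (cs t : List Int) :
    pvZipAdd (c :: cs) (x :: t) = (c + x) :: pvZipAdd cs t := by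
  simp [pvZipAdd_eq, List.zip_cons_cons]

theorem pvProdRep_length (n : Nat) : ∀ a ∈ pvProdRep n, a.length = n := by
  induction n with
  | zero => simp [pvProdRep]
  | succ m ih =>
    intro a ha
    simp only [pvProdRep, List.mem_flatMap, List.mem_map] at ha
    obtain ⟨x, _, rest, hrest, rfl⟩ := ha
    simp [ih rest hrest]

theorem pvZipAdd_inj (coords : List Int) :
    ∀ a b : List Int, a.length = coords.length → b.length = coords.length →
      pvZipAdd coords a = pvZipAdd coords b → a = b := by
  induction coords with
  | nil =>
    intro a b ha hb _
    cases a <;> cases b <;> simp_all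
  | cons c cs ih =>
    intro a b ha hb h
    cases a with
    | nil => simp at ha
    | cons x t =>
      cases b with
      | nil => simp at hb
      | cons y u =>
        rw [pvZipAdd_cons, pvZipAdd_cons] at h
        obtain ⟨h1, h2⟩ := List.cons.inj h
        have ht := ih t u (by simpa using ha) (by simpa using hb) h2
        have hxy : x = y := by omega
        rw [hxy, ht]

theorem pvZipAdd_zero (coords : List Int) :
    pvZipAdd coords (List.replicate coords.length 0) = coords := by
  induction coords with
  | nil => simp [pvZipAdd]
  | cons c cs ih => simpa [List.replicate_succ, pvZipAdd_cons] using ih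

theorem pv_map_prodRep (coords : List Int) :
    (pvProdRep coords.length).map (pvZipAdd coords) = pvProdAbs coords := by
  induction coords with
  | nil => simp [pvProdRep, pvProdAbs, pvZipAdd]
  | cons c cs ih =>
    show (pvProdRep (cs.length + 1)).map (pvZipAdd (c :: cs)) = pvProdAbs (c :: cs)
    simp only [pvProdRep, pvProdAbs, List.flatMap_cons, List.flatMap_nil,
      List.map_append, List.map_map, List.append_nil]
    have key : ∀ x : Int, (pvProdRep cs.length).map (pvZipAdd (c :: cs) ∘ (fun rest => x :: rest))
        = (pvProdAbs cs).map (fun rest => (c + x) :: rest) := by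
      intro x
      rw [← ih, List.map_map]
      apply List.map_congr_left
      intro a _
      simp [Function.comp, pvZipAdd_cons]
    rw [key (-1), key 0, key 1]
    have e1 : c + -1 = c - 1 := by ring
    have e2 : c + 0 = c := by ring
    rw [e1, e2]

theorem pv_remove?_map {α β : Type} [BEq α] [LawfulBEq α] [BEq β] [LawfulBEq β]
    (f : α → β) (l : List α) (v : α) (h : ∀ a ∈ l, f a = f v → a = v) :
    PySem.List.remove? (l.map f) (f v) = (PySem.List.remove? l v).map (List.map f) := by
  induction l with
  | nil => simp [PySem.List.remove?]
  | cons x xs ih =>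
    by_cases hx : x = v
    · subst hx
      simp [PySem.List.remove?_cons_self]
    · have hfx : f x ≠ f v := fun hc => hx (h x (List.mem_cons_self) hc)
      rw [List.map_cons, PySem.List.remove?_cons_of_ne _ hfx, PySem.List.remove?_cons_of_ne _ hx,
        ih (fun a ha => h a (List.mem_cons_of_mem _ ha)), Option.map_map, Option.map_map]
      rfl

-- the two removals correspond under the elementwise-addition map
theorem pv_remove_corr (coords : List Int) :
    PySem.List.remove? (pvProdAbs coords) coords
      = (PySem.List.remove? (pvProdRep coords.length) (List.replicate coords.length 0)).map
          ((List.map (pvZipAdd coords))) := by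
  rw [← pv_map_prodRep]
  have key := pv_remove?_map (pvZipAdd coords) (pvProdRep coords.length)
      (List.replicate coords.length 0)
      (fun a ha hfa =>
        pvZipAdd_inj coords a _ (pvProdRep_length _ a ha) (by simp) hfa)
  rw [pvZipAdd_zero] at key
  exact key

-- ===== VERDICT (by name: the statement is the Claim_ definition above) =====
theorem get_neighbor_coords_spec : Claim_equal_get_neighbor_coords := by
  intro coords _
  unfold Spec_get_neighbor_coords get_neighbor_coords get_neighbor_coords_alt
      get_relative_neighbor_coords
  rw [pv_remove_corr, pv_foldl_append]
  cases PySem.List.remove? (pvProdRep coords.length) (List.replicate coords.length 0) <;> simp
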